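-- pv_equiv track=rewrite | github.com/mathtkang/Data-Structure | 2-6.메모장.py | notepad
-- ===== SOURCE A (Python) =====
-- def notepad(s, commands):
--     left = list(s)
--     right = []
--
--     for line in commands:
--         command = line.split()
--
--         action = command[0]
--
--         if action == "L":
--             if len(left) > 0:
--                 v = left.pop()
--                 right.append(v)
--         elif action == "R":
--             if len(right) > 0:
--                 v = right.pop()
--                 left.append(v)
--         elif action == "D":
--             if len(left) > 0:
--                 left.pop()
--         elif action == "P":
--             left.append(command[1])
--     result = left + right[::-1]
--
--     return "".join(result)
-- ===== SOURCE B (Python) =====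
-- def notepad(s, commands):
--     # Single buffer + integer cursor instead of two stacks.
--     text = list(s)
--     c = len(text)  # number of elements left of the cursor
--     for line in commands:
--         command = line.split()
--         action = command[0]
--         if action == "L":
--             if c > 0:
--                 c -= 1
--         elif action == "R":
--             if c < len(text):
--                 c += 1
--         elif action == "D":
--             if c > 0:
--                 del text[c - 1]
--                 c -= 1
--         elif action == "P":
--             text.insert(c, command[1])
--             c += 1
--     return "".join(text)
-- ===== Notes on version B (the rewrite author's own statement) =====
-- stated objective: alternative
-- what changed: Replaces the two-stack (left/right) gap-buffer representation by a single list plus an integer cursor, with moves becoming pure cursor arithmetic and delete/insert editing the list at the cursor index.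
import Mathlib
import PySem

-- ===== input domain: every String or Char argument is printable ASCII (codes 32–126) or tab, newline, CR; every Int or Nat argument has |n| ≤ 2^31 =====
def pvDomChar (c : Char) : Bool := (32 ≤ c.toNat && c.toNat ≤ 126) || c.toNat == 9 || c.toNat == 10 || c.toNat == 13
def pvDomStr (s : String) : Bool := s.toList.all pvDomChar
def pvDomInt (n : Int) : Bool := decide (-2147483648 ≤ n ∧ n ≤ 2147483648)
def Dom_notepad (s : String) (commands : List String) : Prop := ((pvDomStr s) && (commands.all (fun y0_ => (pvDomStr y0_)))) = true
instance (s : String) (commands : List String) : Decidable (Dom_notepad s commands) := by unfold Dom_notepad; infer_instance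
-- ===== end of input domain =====

-- B replaces A's two-stack gap buffer by a single buffer list plus an integer cursor
-- (moves are cursor arithmetic, delete/insert edit the buffer at the cursor): alternative decomposition.

-- ===== PORT A =====
-- one command of A's loop, acting on the state (left, right)
def pvStepA (st : List String × List String) (line : String) : List String × List String :=
  let command := PySem.Str.split₀ line              -- line.split()
  let action := (PySem.List.pyGet? command 0).getD ""  -- command[0]; IndexError excluded by Pre_
  match st with
  | (left, right) =>
    if action = "L" then
      if 0 < left.length then
        match PySem.List.pop? left with             -- v = left.pop()
        | some (v, left') => (left', right ++ [v])  -- right.append(v)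
        | none => (left, right)
      else (left, right)
    else if action = "R" then
      if 0 < right.length then
        match PySem.List.pop? right with            -- v = right.pop()
        | some (v, right') => (left ++ [v], right') -- left.append(v)
        | none => (left, right)
      else (left, right)
    else if action = "D" then
      if 0 < left.length then
        match PySem.List.pop? left with             -- left.pop()
        | some (_, left') => (left', right)
        | none => (left, right)
      else (left, right)
    else if action = "P" then
      (left ++ [(PySem.List.pyGet? command 1).getD ""], right)  -- left.append(command[1]); IndexError excluded by Pre_
    else (left, right)

def notepad (s : String) (commands : List String) : String :=
  let left := s.toList.map (fun c => String.ofList [c])  -- list(s) (elements are one-char strs)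
  let st := commands.foldl pvStepA (left, [])
  PySem.Str.join "" (st.1 ++ st.2.reverse)           -- "".join(left + right[::-1]); [::-1] = reverse (PySem.List.slice?_none_none_neg_one)

-- ===== PORT B =====
-- one command of B's loop, acting on the state (text, c)
def pvStepB (st : List String × Int) (line : String) : List String × Int :=
  let command := PySem.Str.split₀ line              -- line.split()
  let action := (PySem.List.pyGet? command 0).getD ""  -- command[0]; IndexError excluded by Pre_
  match st with
  | (text, c) =>
    if action = "L" then
      (text, if 0 < c then c - 1 else c)
    else if action = "R" then
      (text, if c < (text.length : Int) then c + 1 else c)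
    else if action = "D" then
      if 0 < c then
        match PySem.List.pop? text (c - 1) with     -- del text[c - 1]
        | some (_, text') => (text', c - 1)
        | none => (text, c)
      else (text, c)
    else if action = "P" then
      (PySem.List.insert text c ((PySem.List.pyGet? command 1).getD ""), c + 1)  -- text.insert(c, command[1])
    else (text, c)

def notepad_alt (s : String) (commands : List String) : String :=
  let text := s.toList.map (fun c => String.ofList [c])  -- list(s)
  let st := commands.foldl pvStepB (text, (text.length : Int))
  PySem.Str.join "" st.1                             -- "".join(text)

-- ===== PRECONDITION & SPEC =====
-- Pre_ excludes exactly the inputs where the Python raises IndexError: a command line that is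
-- all whitespace (command[0] fails) or whose first token is "P" with no second token (command[1] fails).
def Pre_notepad (s : String) (commands : List String) : Prop :=
  ∀ line ∈ commands, PySem.Str.split₀ line ≠ [] ∧
    ((PySem.Str.split₀ line).headD "" = "P" → 2 ≤ (PySem.Str.split₀ line).length)
instance (s : String) (commands : List String) : Decidable (Pre_notepad s commands) := by
  unfold Pre_notepad; infer_instance

def pvWitness_notepad : String × List String := ("ab", ["P xy", "L", "D", "R", "P !", "Z"])

def Spec_notepad (s : String) (commands : List String) (out : String) : Prop := out = notepad_alt s commands
instance (s : String) (commands : List String) (out : String) : Decidable (Spec_notepad s commands out) := by unfold Spec_notepad; infer_instance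

-- ===== CLAIM (what is proved, stated in full; the proofs are below) =====
def Claim_equal_notepad : Prop := ∀ (s : String) (commands : List String), Dom_notepad s commands → Pre_notepad s commands → Spec_notepad s commands (notepad s commands)

-- ===== LEMMAS AND PROOFS =====

-- the simulation invariant: B's buffer is A's left ++ reversed right, B's cursor is A's left length
def pvInv (st : List String × List String) (tc : List String × Int) : Prop :=
  tc.1 = st.1 ++ st.2.reverse ∧ tc.2 = (st.1.length : Int)

theorem pvStep_inv (st : List String × List String) (tc : List String × Int) (line : String)
    (h : pvInv st tc) : pvInv (pvStepA st line) (pvStepB tc line) := by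
  obtain ⟨l, r⟩ := st
  obtain ⟨text, c⟩ := tc
  obtain ⟨ht, hc⟩ := h
  simp only [pvInv] at ht hc ⊢
  subst ht hc
  simp only [pvStepA, pvStepB]
  by_cases hL : (PySem.List.pyGet? (PySem.Str.split₀ line) 0).getD "" = "L"
  · simp only [if_pos hL]
    rcases List.eq_nil_or_concat l with rfl | ⟨xs, x, rfl⟩
    · simp
    · simp only [List.concat_eq_append]
      rw [PySem.List.pop?_last]
      have h1 : 0 < (xs ++ [x]).length := by simp
      rw [if_pos h1, if_pos (by exact_mod_cast h1 : (0 : Int) < ((xs ++ [x]).length : Int))]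
      refine ⟨by simp, ?_⟩
      simp
  · simp only [if_neg hL]
    by_cases hR : (PySem.List.pyGet? (PySem.Str.split₀ line) 0).getD "" = "R"
    · simp only [if_pos hR]
      rcases List.eq_nil_or_concat r with rfl | ⟨ys, y, rfl⟩
      · simp
      · simp only [List.concat_eq_append]
        rw [PySem.List.pop?_last]
        have h1 : 0 < (ys ++ [y]).length := by simp
        have h2 : (l.length : Int) < ((l ++ (ys ++ [y]).reverse).length : Int) := by
          simp
        rw [if_pos h1, if_pos h2]
        refine ⟨by simp, by simp⟩
    · simp only [if_neg hR]
      by_cases hD : (PySem.List.pyGet? (PySem.Str.split₀ line) 0).getD "" = "D"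
      · simp only [if_pos hD]
        rcases List.eq_nil_or_concat l with rfl | ⟨xs, x, rfl⟩
        · simp
        · simp only [List.concat_eq_append]
          have h1 : 0 < (xs ++ [x]).length := by simp
          have h2 : (0 : Int) < (((xs ++ [x]).length : Nat) : Int) := by exact_mod_cast h1
          rw [if_pos h1, if_pos h2, PySem.List.pop?_last]
          have h3 : (((xs ++ [x]).length : Nat) : Int) - 1 = ((xs.length : Nat) : Int) := by
            simp
          have h4 : xs.length < ((xs ++ [x]) ++ r.reverse).length := by simp
          rw [h3, PySem.List.pop?_natCast _ _ h4]
          refine ⟨?_, by simp⟩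
          show ((xs ++ [x]) ++ r.reverse).eraseIdx xs.length = xs ++ r.reverse
          rw [List.append_assoc, List.eraseIdx_append_of_length_le (le_refl xs.length)]
          simp
      · simp only [if_neg hD]
        by_cases hP : (PySem.List.pyGet? (PySem.Str.split₀ line) 0).getD "" = "P"
        · simp only [if_pos hP]
          rw [show ((l.length : Nat) : Int) = (l.length : Int) from rfl,
            PySem.List.insert_natCast _ _ _ (by simp)]
          refine ⟨?_, by simp⟩
          rw [List.take_left, List.drop_left]
          simp
        · simp only [if_neg hP]
          constructor <;> simp

theorem pvFold_inv (commands : List String) (st : List String × List String) (tc : List String × Int)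
    (h : pvInv st tc) : pvInv (commands.foldl pvStepA st) (commands.foldl pvStepB tc) := by
  induction commands generalizing st tc with
  | nil => exact h
  | cons line rest ih => exact ih _ _ (pvStep_inv st tc line h)

-- ===== VERDICT (by name: the statement is the Claim_ definition above) =====
theorem notepad_spec : Claim_equal_notepad := by
  intro s commands _ _
  show notepad s commands = notepad_alt s commands
  unfold notepad notepad_alt
  have h := pvFold_inv commands (s.toList.map (fun c => String.ofList [c]), [])
    (s.toList.map (fun c => String.ofList [c]), ((s.toList.map (fun c => String.ofList [c])).length : Int))
    (by constructor <;> simp)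
  obtain ⟨ht, _⟩ := h
  simp only [ht]
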